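-- pv_equiv track=rewrite | github.com/amundas/NLFSR | software/nlfsr_utils.py | format_vec2list
-- ===== SOURCE A (Python) =====
-- def format_vec2list(N: int, lin: int, nlins: list) -> list:
--     list = []
--     for i in range(N):
--         if (lin >> i) & 1:
--             list.append([i])
--     for nl in nlins:
--         tmp = []
--         for i in range(N):
--             if (nl >> i) & 1:
--                 tmp.append(i)
--         list.append(tmp)
--     return list
-- ===== SOURCE B (Python) =====
-- def format_vec2list(N: int, lin: int, nlins: list) -> list:
--     # Divide and conquer over the position range [0, N): split at the midpoint,
--     # recurse on the low half (x mod 2**(mid-lo)) and the high half (x shifted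
--     # down by mid-lo), prune chunks holding no set bits, concatenate the halves.
--     def bits(x, lo, hi):
--         # set-bit positions in [lo, hi); bit 0 of x corresponds to position lo
--         if lo >= hi or x == 0:
--             return []
--         if hi - lo == 1:
--             return [lo] if x & 1 else []
--         mid = (lo + hi) // 2
--         return bits(x % (1 << (mid - lo)), lo, mid) + bits(x >> (mid - lo), mid, hi)
--     return [[i] for i in bits(lin, 0, N)] + [bits(nl, 0, N) for nl in nlins]
-- ===== Notes on version B (the rewrite author's own statement) =====
-- stated objective: alternative
-- what changed: Instead of A's index-driven linear scan of every position 0..N-1 per term, B finds each term's set-bit positions by divide and conquer on the position range: it splits [0,N) at the midpoint, recurses on each half (reducing the left half modulo 2**mid) and prunes subranges containing no set bits, concatenating the halves' results.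
import Mathlib
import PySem

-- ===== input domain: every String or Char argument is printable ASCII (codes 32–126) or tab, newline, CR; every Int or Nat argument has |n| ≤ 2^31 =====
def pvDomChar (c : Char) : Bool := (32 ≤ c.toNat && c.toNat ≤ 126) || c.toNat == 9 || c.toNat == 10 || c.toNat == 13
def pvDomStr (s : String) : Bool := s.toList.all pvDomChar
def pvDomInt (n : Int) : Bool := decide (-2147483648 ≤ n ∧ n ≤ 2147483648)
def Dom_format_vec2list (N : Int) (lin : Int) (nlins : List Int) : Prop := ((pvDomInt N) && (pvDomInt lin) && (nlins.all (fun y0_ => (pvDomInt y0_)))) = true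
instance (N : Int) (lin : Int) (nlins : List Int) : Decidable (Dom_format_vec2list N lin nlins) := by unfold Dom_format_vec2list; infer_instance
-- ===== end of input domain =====

-- B replaces A's per-term linear scan of all N positions with a divide-and-conquer recursion
-- over the position range [0, N) that prunes bit-free subranges (alternative decomposition).

-- ===== PORT A =====
def format_vec2list (N : Int) (lin : Int) (nlins : List Int) : List (List Int) :=
  -- list = []; for i in range(N): if (lin >> i) & 1: list.append([i])
  let l1 := (PySem.List.pyRange 0 N 1).foldl
    (fun acc i => if PySem.Int.band (lin >>> i.toNat) 1 != 0 then acc ++ [[i]] else acc) []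
  -- for nl in nlins: tmp = []; for i in range(N): if (nl >> i) & 1: tmp.append(i); list.append(tmp)
  nlins.foldl (fun acc nl =>
    acc ++ [(PySem.List.pyRange 0 N 1).foldl
      (fun tmp i => if PySem.Int.band (nl >>> i.toNat) 1 != 0 then tmp ++ [i] else tmp) []]) l1

-- ===== PORT B =====
-- midpoint bounds, cited by the port's decreasing_by
theorem pvMid_bounds (lo hi : Int) (h : lo + 2 ≤ hi) :
    lo + 1 ≤ PySem.Int.floordiv (lo + hi) 2 ∧ PySem.Int.floordiv (lo + hi) 2 ≤ hi - 1 := by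
  rw [PySem.Int.floordiv_eq_ediv_of_pos (by norm_num)]
  omega

-- Source B's bits(x, lo, hi): set-bit positions in [lo, hi), bit 0 of x at position lo
def pvBitsDC (x lo hi : Int) : List Int :=
  if lo ≥ hi ∨ x = 0 then []
  else if hi - lo = 1 then
    (if PySem.Int.band x 1 != 0 then [lo] else [])
  else
    -- mid = (lo + hi) // 2
    pvBitsDC (PySem.Int.mod x ((1 : Int) <<< (PySem.Int.floordiv (lo + hi) 2 - lo).toNat))
        lo (PySem.Int.floordiv (lo + hi) 2)
      ++ pvBitsDC (x >>> (PySem.Int.floordiv (lo + hi) 2 - lo).toNat)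
        (PySem.Int.floordiv (lo + hi) 2) hi
termination_by (hi - lo).toNat
decreasing_by
  · have := pvMid_bounds lo hi (by omega); omega
  · have := pvMid_bounds lo hi (by omega); omega

def format_vec2list_alt (N : Int) (lin : Int) (nlins : List Int) : List (List Int) :=
  (pvBitsDC lin 0 N).map (fun i => [i]) ++ nlins.map (fun nl => pvBitsDC nl 0 N)

-- ===== PRECONDITION & SPEC =====
def Spec_format_vec2list (N : Int) (lin : Int) (nlins : List Int) (out : List (List Int)) : Prop := out = format_vec2list_alt N lin nlins
instance (N : Int) (lin : Int) (nlins : List Int) (out : List (List Int)) : Decidable (Spec_format_vec2list N lin nlins out) := by unfold Spec_format_vec2list; infer_instance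

-- ===== CLAIM (what is proved, stated in full; the proofs are below) =====
def Claim_equal_format_vec2list : Prop := ∀ (N : Int) (lin : Int) (nlins : List Int), Dom_format_vec2list N lin nlins → Spec_format_vec2list N lin nlins (format_vec2list N lin nlins)

-- ===== LEMMAS AND PROOFS =====

-- for 0 ≤ i, the elaborated shift x >>> ↑i.toNat (i.e. x >>> max i 0) is the Nat-shift
theorem pv_shift_max (x i : Int) : x >>> max i 0 = x >>> i.toNat := by
  rw [show max i 0 = ((i.toNat : Nat) : Int) by omega, Int.shiftRight_natCast_right]

-- x >>> k is floor division by 2^k (with the power cast pushed to Int)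
theorem pv_shift_div (x : Int) (k : Nat) : x >>> k = x / 2 ^ k := by
  rw [Int.shiftRight_eq_div_pow]; push_cast; rfl

-- bit k of x % 2^m equals bit k of x, for k < m
theorem pv_mod_bit (x : Int) (m k : Nat) (hk : k < m) :
    PySem.Int.band (PySem.Int.mod x ((1 : Int) <<< m) >>> k) 1
      = PySem.Int.band (x >>> k) 1 := by
  have hM : ((1 : Int) <<< m) = 2 ^ m := by rw [Int.shiftLeft_eq]; ring
  have h2m : (0 : Int) < 2 ^ m := by positivity
  rw [hM, PySem.Int.mod_eq_emod_of_pos h2m, PySem.Int.band_one, PySem.Int.band_one,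
    PySem.Int.mod_eq_emod_of_pos (by norm_num : (0:Int) < 2),
    PySem.Int.mod_eq_emod_of_pos (by norm_num : (0:Int) < 2),
    pv_shift_div, pv_shift_div]
  have hsplit : x % 2 ^ m = x + (-(x / 2 ^ m) * 2 ^ (m - k)) * 2 ^ k := by
    have hpow : (2 : Int) ^ (m - k) * 2 ^ k = 2 ^ m := by
      rw [← pow_add]; congr 1; omega
    rw [Int.emod_def]
    have : -(x / 2 ^ m) * 2 ^ (m - k) * 2 ^ k = -(x / 2 ^ m) * (2 ^ (m - k) * 2 ^ k) := by ring
    rw [this, hpow]; ring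
  rw [hsplit, Int.add_mul_ediv_right _ _ (by positivity : (2:Int)^k ≠ 0)]
  have hev : -(x / 2 ^ m) * 2 ^ (m - k) = (-(x / 2 ^ m) * 2 ^ (m - k - 1)) * 2 := by
    rw [mul_assoc, ← pow_succ]; congr 2; omega
  rw [hev, Int.add_mul_emod_self_right]

-- composing two right-shifts adds the shift amounts
theorem pv_shift_shift (x : Int) (a b : Nat) : (x >>> a) >>> b = x >>> (a + b) := by
  rw [pv_shift_div, pv_shift_div, pv_shift_div, pow_add]
  rw [Int.ediv_ediv_of_nonneg (by positivity : (0:Int) ≤ 2 ^ a)]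

-- the characterization: pvBitsDC equals the linear scan of [lo, hi), reading bit i - lo of x
theorem pvBitsDC_eq (n : Nat) : ∀ (x lo hi : Int), (hi - lo).toNat ≤ n →
    pvBitsDC x lo hi
      = (PySem.List.pyRange lo hi 1).filter
          (fun i => PySem.Int.band (x >>> (i - lo).toNat) 1 != 0) := by
  induction n with
  | zero =>
    intro x lo hi hn
    rw [pvBitsDC, if_pos (Or.inl (by omega)), PySem.List.pyRange_one_eq_nil (by omega)]
    rfl
  | succ n ih =>
    intro x lo hi hn
    rw [pvBitsDC]
    by_cases hge : lo ≥ hi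
    · rw [if_pos (Or.inl hge), PySem.List.pyRange_one_eq_nil hge]; rfl
    · by_cases hz : x = 0
      · rw [if_pos (Or.inr hz), hz]
        symm
        rw [List.filter_eq_nil_iff]
        intro i him
        simp [PySem.Int.band_one]
      · rw [if_neg (not_or.mpr ⟨by omega, hz⟩)]
        by_cases h1 : hi - lo = 1
        · rw [if_pos h1, show hi = lo + 1 by omega, PySem.List.pyRange_one_singleton]
          by_cases hb : PySem.Int.band x 1 != 0 <;> simp [List.filter, hb]
        · rw [if_neg h1]
          have hm := pvMid_bounds lo hi (by omega)
          rw [PySem.List.pyRange_one_append lo (PySem.Int.floordiv (lo + hi) 2) hi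
            (by omega) (by omega), List.filter_append]
          rw [ih (x >>> (PySem.Int.floordiv (lo + hi) 2 - lo).toNat)
            (PySem.Int.floordiv (lo + hi) 2) hi (by omega)]
          rw [ih (PySem.Int.mod x ((1 : Int) <<< (PySem.Int.floordiv (lo + hi) 2 - lo).toNat))
            lo (PySem.Int.floordiv (lo + hi) 2) (by omega)]
          congr 1
          · apply List.filter_congr
            intro i him
            rw [PySem.List.mem_pyRange_one] at him
            rw [pv_mod_bit x (PySem.Int.floordiv (lo + hi) 2 - lo).toNat (i - lo).toNat (by omega)]
          · apply List.filter_congr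
            intro i him
            rw [PySem.List.mem_pyRange_one] at him
            rw [pv_shift_shift,
              show (PySem.Int.floordiv (lo + hi) 2 - lo).toNat
                + (i - PySem.Int.floordiv (lo + hi) 2).toNat = (i - lo).toNat by omega]

-- at lo = 0, the scan predicate reads bit i of x
theorem pv_scan (x N : Int) :
    (PySem.List.pyRange 0 N 1).filter (fun i => PySem.Int.band (x >>> i.toNat) 1 != 0)
      = pvBitsDC x 0 N := by
  rw [pvBitsDC_eq (N - 0).toNat x 0 N le_rfl]
  apply List.filter_congr
  intro i hi
  simp [pv_shift_max]

-- ===== VERDICT (by name: the statement is the Claim_ definition above) =====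
theorem format_vec2list_spec : Claim_equal_format_vec2list := by
  intro N lin nlins _
  unfold Spec_format_vec2list
  simp only [format_vec2list, format_vec2list_alt]
  rw [PySem.List.foldl_append_if, PySem.List.foldl_append_singleton_eq_map,
    List.nil_append, pv_scan lin N]
  congr 1
  apply List.map_congr_left
  intro nl _
  rw [PySem.List.foldl_append_if_eq_filter, List.nil_append]
  rw [← pv_scan nl N]
  apply List.filter_congr
  intro i hi
  rw [PySem.List.mem_pyRange_one] at hi
  have h : nl >>> max i 0 = nl >>> i.toNat := pv_shift_max nl i
  simp [h]
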